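-- pv_equiv track=rewrite | github.com/LeaWron/mdd-paradigm | tests/test_gen.py | check_prt_seq
-- ===== SOURCE A (Python) =====
-- def check_prt_seq(
--     stim_seq: list[str],
--     max_seq_same: int = 3,
-- ):
--     pre = None
--     cnt = 0
--     for stim in stim_seq:
--         if pre == stim:
--             cnt += 1
--             if cnt > max_seq_same:
--                 return False
--         else:
--             cnt = 1
--         pre = stim
--     return True
-- ===== SOURCE B (Python) =====
-- def check_prt_seq(
--     stim_seq: list[str],
--     max_seq_same: int = 3,
-- ):
--     i, n = 0, len(stim_seq)
--     while i < n:
--         j = i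
--         while j < n and stim_seq[j] == stim_seq[i]:
--             j += 1
--         if j - i > max_seq_same:
--             return False
--         i = j
--     return True
-- ===== Notes on version B (the rewrite author's own statement) =====
-- stated objective: alternative
-- what changed: B partitions the sequence into maximal runs with a two-pointer scan and compares each whole run length to the cap once, instead of A's per-element previous/counter state machine that increments and checks inside the loop.
-- intended difference: When max_seq_same <= 0 and stim_seq is nonempty with no two equal adjacent elements, A returns True because its check is skipped on the first element of every run, while B returns False since every run of length 1 already exceeds a nonpositive cap, which is the intended meaning of the limit. — e.g. on check_prt_seq(["a"], 0): A returns true, B returns false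
import Mathlib
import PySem

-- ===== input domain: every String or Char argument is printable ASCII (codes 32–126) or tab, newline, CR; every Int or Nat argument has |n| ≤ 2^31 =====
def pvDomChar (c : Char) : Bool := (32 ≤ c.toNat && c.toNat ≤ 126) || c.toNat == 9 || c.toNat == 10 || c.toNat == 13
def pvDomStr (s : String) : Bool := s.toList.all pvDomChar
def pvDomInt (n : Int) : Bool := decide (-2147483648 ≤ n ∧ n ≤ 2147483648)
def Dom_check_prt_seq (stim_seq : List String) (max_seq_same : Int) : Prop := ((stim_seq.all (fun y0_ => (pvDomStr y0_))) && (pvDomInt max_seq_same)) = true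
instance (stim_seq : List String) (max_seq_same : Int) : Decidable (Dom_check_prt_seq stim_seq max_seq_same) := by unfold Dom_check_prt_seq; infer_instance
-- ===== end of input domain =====

-- B replaces A's previous/counter state machine by a two-pointer maximal-run scan (objective: alternative, same cost).

-- ===== PORT A =====
-- A's for-loop over stim_seq with state (pre, cnt), branches in source order.
def checkLoopA (stim_seq : List String) (pre : Option String) (cnt : Int) (max_seq_same : Int) : Bool :=
  match stim_seq with
  | [] => true
  | stim :: rest =>
    if pre == some stim then
      if cnt + 1 > max_seq_same then false
      else checkLoopA rest (some stim) (cnt + 1) max_seq_same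
    else
      checkLoopA rest (some stim) 1 max_seq_same

def check_prt_seq (stim_seq : List String) (max_seq_same : Int) : Bool :=
  checkLoopA stim_seq none 0 max_seq_same

-- ===== PORT B =====
-- inner while loop of B: length of the maximal run of s at the front of l, and the remainder.
def runLen (s : String) (l : List String) : Nat × List String :=
  match l with
  | [] => (0, [])
  | t :: rest =>
    if t == s then
      let p := runLen s rest
      (p.1 + 1, p.2)
    else (0, t :: rest)

theorem runLen_length_le (s : String) (l : List String) : (runLen s l).2.length ≤ l.length := by
  induction l with
  | nil => simp [runLen]
  | cons t rest ih =>
    simp only [runLen]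
    split
    · exact le_trans ih (Nat.le_succ _)
    · simp

-- outer while loop of B: check each maximal run's length against the cap.
def altGo (l : List String) (max_seq_same : Int) : Bool :=
  match l with
  | [] => true
  | s :: rest =>
    let p := runLen s rest
    if ((p.1 : Int) + 1) > max_seq_same then false
    else altGo p.2 max_seq_same
termination_by l.length
decreasing_by
  exact Nat.lt_succ_of_le (runLen_length_le s rest)

def check_prt_seq_alt (stim_seq : List String) (max_seq_same : Int) : Bool :=
  altGo stim_seq max_seq_same

-- ===== PRECONDITION & SPEC =====
-- true iff no two adjacent elements of the list are equal (used only to state D_).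
def noAdjRepeat (l : List String) : Bool :=
  match l with
  | [] => true
  | [_] => true
  | a :: b :: rest => a != b && noAdjRepeat (b :: rest)

-- When max_seq_same ≤ 0 and stim_seq is nonempty with no two equal adjacent elements, A returns
-- true because its counter check is skipped on the first element of every run, while B returns
-- false since every run of length 1 already exceeds a nonpositive cap — the intended meaning.
def D_check_prt_seq (stim_seq : List String) (max_seq_same : Int) : Prop :=
  max_seq_same ≤ 0 ∧ stim_seq ≠ [] ∧ noAdjRepeat stim_seq = true
instance (stim_seq : List String) (max_seq_same : Int) : Decidable (D_check_prt_seq stim_seq max_seq_same) := by unfold D_check_prt_seq; infer_instance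

def Spec_check_prt_seq (stim_seq : List String) (max_seq_same : Int) (out : Bool) : Prop := ¬ D_check_prt_seq stim_seq max_seq_same → out = check_prt_seq_alt stim_seq max_seq_same
instance (stim_seq : List String) (max_seq_same : Int) (out : Bool) : Decidable (Spec_check_prt_seq stim_seq max_seq_same out) := by unfold Spec_check_prt_seq; infer_instance

def pvDiffWitness_check_prt_seq : List String × Int := (["a"], 0)
def pvDiffWitnessOut_check_prt_seq : Bool × Bool := (true, false)

-- ===== CLAIM (what is proved, stated in full; the proofs are below) =====
def Claim_unchanged_check_prt_seq : Prop := ∀ (stim_seq : List String) (max_seq_same : Int), Dom_check_prt_seq stim_seq max_seq_same → Spec_check_prt_seq stim_seq max_seq_same (check_prt_seq stim_seq max_seq_same)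
def Claim_changed_check_prt_seq : Prop := Dom_check_prt_seq (pvDiffWitness_check_prt_seq.1) (pvDiffWitness_check_prt_seq.2) ∧ D_check_prt_seq (pvDiffWitness_check_prt_seq.1) (pvDiffWitness_check_prt_seq.2) ∧ check_prt_seq (pvDiffWitness_check_prt_seq.1) (pvDiffWitness_check_prt_seq.2) = pvDiffWitnessOut_check_prt_seq.1 ∧ check_prt_seq_alt (pvDiffWitness_check_prt_seq.1) (pvDiffWitness_check_prt_seq.2) = pvDiffWitnessOut_check_prt_seq.2 ∧ pvDiffWitnessOut_check_prt_seq.1 ≠ pvDiffWitnessOut_check_prt_seq.2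
def Claim_exact_check_prt_seq : Prop := ∀ (stim_seq : List String) (max_seq_same : Int), Dom_check_prt_seq stim_seq max_seq_same → D_check_prt_seq stim_seq max_seq_same → check_prt_seq stim_seq max_seq_same ≠ check_prt_seq_alt stim_seq max_seq_same

-- ===== LEMMAS AND PROOFS =====

-- the remainder after a maximal run of s does not start with s
theorem runLen_head_ne (s : String) (l : List String) :
    ∀ u, (runLen s l).2.head? = some u → u ≠ s := by
  induction l with
  | nil => simp [runLen]
  | cons t rest ih =>
    intro u hu
    simp only [runLen] at hu
    split at hu
    · exact ih u hu
    · rename_i h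
      simp at hu
      subst hu
      simpa using h

-- inside a run: A's loop consumes the whole run, failing iff the counter ever exceeds the cap
theorem loopA_run (l : List String) : ∀ (s : String) (cnt m : Int), cnt ≤ m →
    checkLoopA l (some s) cnt m =
      (if m < cnt + ((runLen s l).1 : Int) then false
       else checkLoopA (runLen s l).2 (some s) (cnt + ((runLen s l).1 : Int)) m) := by
  induction l with
  | nil =>
    intro s cnt m h
    simp only [runLen, checkLoopA]
    rw [if_neg]; omega
  | cons t rest ih =>
    intro s cnt m h
    by_cases ht : t = s
    · subst ht
      have h1 : runLen t (t :: rest) = ((runLen t rest).1 + 1, (runLen t rest).2) := by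
        simp [runLen]
      have h2 : checkLoopA (t :: rest) (some t) cnt m =
          if cnt + 1 > m then false else checkLoopA rest (some t) (cnt + 1) m := by
        simp [checkLoopA]
      rw [h2, h1]
      by_cases hc : cnt + 1 > m
      · rw [if_pos hc, if_pos (by push_cast; omega)]
      · rw [if_neg hc, ih t (cnt + 1) m (by omega)]
        by_cases hc2 : m < cnt + 1 + ((runLen t rest).1 : Int)
        · rw [if_pos hc2, if_pos (by push_cast; omega)]
        · rw [if_neg hc2, if_neg (by push_cast; omega)]
          have : cnt + 1 + ((runLen t rest).1 : Int) = cnt + (((runLen t rest).1 + 1 : Nat) : Int) := by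
            push_cast; ring
          rw [this]
    · have hne : ((some s : Option String) == some t) = false := by
        simp only [beq_eq_false_iff_ne, ne_eq, Option.some.injEq]
        exact fun h' => ht h'.symm
      have h1 : runLen s (t :: rest) = (0, t :: rest) := by
        simp [runLen, ht]
      have h2 : checkLoopA (t :: rest) (some s) cnt m = checkLoopA rest (some t) 1 m := by
        simp [checkLoopA, hne]
      rw [h1, h2]
      rw [if_neg (by push_cast; omega)]
      simp [checkLoopA, hne]

-- with a positive cap, A's loop from a fresh previous element equals B's run scan
theorem loopA_eq_altGo : ∀ (n : Nat) (l : List String), l.length ≤ n → ∀ (p : Option String) (cnt m : Int),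
    1 ≤ m → (∀ u, l.head? = some u → p ≠ some u) →
    checkLoopA l p cnt m = altGo l m := by
  intro n
  induction n with
  | zero =>
    intro l hl _ _ _ _ _
    have : l = [] := by cases l <;> simp_all
    subst this
    simp [checkLoopA, altGo]
  | succ n ih =>
    intro l hl p cnt m hm hp
    match l with
    | [] => simp [checkLoopA, altGo]
    | t :: rest =>
      have hpt : (p == some t) = false := by
        have := hp t (by simp)
        simpa using this
      rw [show checkLoopA (t :: rest) p cnt m = checkLoopA rest (some t) 1 m by
            simp [checkLoopA, hpt]]
      rw [loopA_run rest t 1 m hm]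
      rw [show altGo (t :: rest) m =
            (if ((runLen t rest).1 : Int) + 1 > m then false else altGo (runLen t rest).2 m) from by
            rw [altGo]]
      by_cases hc : m < 1 + ((runLen t rest).1 : Int)
      · rw [if_pos hc, if_pos (by omega)]
      · rw [if_neg hc, if_neg (by omega)]
        exact ih (runLen t rest).2
          (by have := runLen_length_le t rest; simp at hl; omega)
          (some t) _ m hm
          (by intro u hu h'; exact runLen_head_ne t rest u hu (by simpa using h'.symm))

-- with a nonpositive cap, B rejects any nonempty list
theorem altGo_nonpos (t : String) (rest : List String) (m : Int) (hm : m ≤ 0) :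
    altGo (t :: rest) m = false := by
  rw [altGo]
  split
  · rfl
  · rename_i h; exfalso; omega

-- with a nonpositive cap, A rejects any list with two equal adjacent elements
theorem loopA_nonpos_dup : ∀ (l : List String) (p : Option String) (cnt m : Int),
    m ≤ 0 → 0 ≤ cnt → noAdjRepeat l = false → checkLoopA l p cnt m = false := by
  intro l
  induction l with
  | nil => intro _ _ _ _ _ h; simp [noAdjRepeat] at h
  | cons t rest ih =>
    intro p cnt m hm hc hrep
    by_cases hpt : p = some t
    · subst hpt
      simp only [checkLoopA, beq_self_eq_true]
      simp
      intro h
      exact absurd h (by omega)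
    · rw [show checkLoopA (t :: rest) p cnt m = checkLoopA rest (some t) 1 m from by
            simp [checkLoopA, (by simpa using hpt : (p == some t) = false)]]
      match rest with
      | [] => simp [noAdjRepeat] at hrep
      | u :: rest2 =>
        by_cases hut : u = t
        · subst hut
          simp only [checkLoopA, beq_self_eq_true]
          simp
          intro h
          exact absurd h (by omega)
        · have h2 : (t != u) = true := by
            simp only [bne_iff_ne, ne_eq]
            exact fun h => hut h.symm
          have hrest : noAdjRepeat (u :: rest2) = false := by
            simpa [noAdjRepeat, h2] using hrep
          exact ih (some t) 1 m hm (by omega) hrest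

-- with no two equal adjacent elements, A's check never fires, for any cap
theorem loopA_chain_true : ∀ (l : List String) (p : Option String) (cnt m : Int),
    (∀ u, l.head? = some u → p ≠ some u) → noAdjRepeat l = true →
    checkLoopA l p cnt m = true := by
  intro l
  induction l with
  | nil => intro _ _ _ _ _; simp [checkLoopA]
  | cons t rest ih =>
    intro p cnt m hp hrep
    have hpt : (p == some t) = false := by
      have := hp t (by simp); simpa using this
    rw [show checkLoopA (t :: rest) p cnt m = checkLoopA rest (some t) 1 m from by
          simp [checkLoopA, hpt]]
    match rest with
    | [] => simp [checkLoopA]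
    | u :: rest2 =>
      simp only [noAdjRepeat, Bool.and_eq_true, bne_iff_ne, ne_eq] at hrep
      exact ih (some t) 1 m
        (by intro v hv h'; simp at hv h'; subst hv; exact hrep.1 h') hrep.2

-- ===== VERDICT (by name: the statement is the Claim_ definition above) =====
theorem check_prt_seq_spec : Claim_unchanged_check_prt_seq := by
  intro l m _
  unfold Spec_check_prt_seq
  intro hnD
  unfold D_check_prt_seq at hnD
  push Not at hnD
  unfold check_prt_seq check_prt_seq_alt
  by_cases hm : 1 ≤ m
  · exact loopA_eq_altGo l.length l le_rfl none 0 m hm (by intro u _ h; cases h)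
  · have hm' : m ≤ 0 := by omega
    match l with
    | [] => simp [checkLoopA, altGo]
    | t :: rest =>
      have hrep : noAdjRepeat (t :: rest) = false := by
        have := hnD hm' (by simp)
        simpa using this
      rw [altGo_nonpos t rest m hm', loopA_nonpos_dup (t :: rest) none 0 m hm' le_rfl hrep]

theorem check_prt_seq_changed : Claim_changed_check_prt_seq := by
  unfold Claim_changed_check_prt_seq
  refine ⟨by decide, by decide, by decide, ?_, by decide⟩
  show check_prt_seq_alt ["a"] 0 = false
  unfold check_prt_seq_alt
  exact altGo_nonpos "a" [] 0 le_rfl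

theorem check_prt_seq_tight : Claim_exact_check_prt_seq := by
  intro l m _ hD
  obtain ⟨hm, hne, hrep⟩ := hD
  match l, hne with
  | t :: rest, _ =>
    unfold check_prt_seq check_prt_seq_alt
    rw [altGo_nonpos t rest m hm,
        loopA_chain_true (t :: rest) none 0 m (by intro u _ h; cases h) hrep]
    simp
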